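-- pv_equiv track=rewrite | github.com/H-Software224/KHUDA-Algorithm-Study | JOONHYUk_LEE/[12일차]_리스트(배열).py | solution
-- ===== SOURCE A (Python) =====
-- def solution(arr, query):
--     result = []
--     # query 정수 순회
--     # arr 배열의 query[i] 번째 index를 찾고 기존의 배열에서 뒷부분, 앞부분 삭제
--     for i in range(len(query)):
--         if i % 2 == 0:
--             index = query[i] + 1
--             arr = arr[:index]
--         else:
--             index = query[i]
--             arr = arr[index:]
--     return arr
-- ===== SOURCE B (Python) =====
-- def solution(arr, query):
--     # track the surviving window [lo, hi) and slice once at the end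
--     lo, hi = 0, len(arr)
--     for i, q in enumerate(query):
--         L = hi - lo
--         b = q + 1 if i % 2 == 0 else q
--         if b < 0:
--             b += L
--         c = max(0, min(b, L))
--         if i % 2 == 0:
--             hi = lo + c
--         else:
--             lo = lo + c
--     return arr[lo:hi]
-- ===== Notes on version B (the rewrite author's own statement) =====
-- stated objective: alternative
-- what changed: Instead of materialising a new list slice for every query, B keeps only the surviving window bounds [lo,hi) updated with Python's slice-clamping arithmetic and performs a single slice at the end.
import Mathlib
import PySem

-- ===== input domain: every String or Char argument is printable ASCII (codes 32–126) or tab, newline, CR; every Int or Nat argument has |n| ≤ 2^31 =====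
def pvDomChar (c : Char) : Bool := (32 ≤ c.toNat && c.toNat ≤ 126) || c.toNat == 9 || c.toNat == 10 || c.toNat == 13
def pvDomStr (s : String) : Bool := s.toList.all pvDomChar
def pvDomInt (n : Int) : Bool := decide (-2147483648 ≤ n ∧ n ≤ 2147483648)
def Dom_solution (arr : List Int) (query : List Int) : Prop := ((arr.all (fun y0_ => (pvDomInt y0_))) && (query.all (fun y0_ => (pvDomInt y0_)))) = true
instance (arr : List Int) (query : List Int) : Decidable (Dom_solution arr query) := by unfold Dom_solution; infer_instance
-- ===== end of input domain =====

-- B replaces A's repeated list slicing (one new list per query) by tracking the surviving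
-- window [lo, hi) with Python slice-clamping arithmetic and slicing once at the end (alternative algorithm).


-- ===== PORT A =====
-- for i in range(len(query)): even i → arr = arr[:query[i]+1]; odd i → arr = arr[query[i]:]
def solution (arr : List Int) (query : List Int) : List Int :=
  (PySem.List.pyRange 0 (query.length : Int) 1).foldl
    (fun a i =>
      if PySem.Int.mod i 2 = 0 then
        PySem.List.slice a none (some (PySem.List.pyGetD query i 0 + 1))
      else
        PySem.List.slice a (some (PySem.List.pyGetD query i 0)) none)
    arr

-- ===== PORT B =====
-- one step of B's loop body: update (lo, hi) for query value q at position i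
def solAltStep (s : Int × Int) (iq : Int × Int) : Int × Int :=
  let L := s.2 - s.1
  let b := if PySem.Int.mod iq.1 2 = 0 then iq.2 + 1 else iq.2
  let b := if b < 0 then b + L else b
  let c := max 0 (min b L)
  if PySem.Int.mod iq.1 2 = 0 then (s.1, s.1 + c) else (s.1 + c, s.2)

def solution_alt (arr : List Int) (query : List Int) : List Int :=
  let s := (PySem.List.enumerate query 0).foldl solAltStep (0, (arr.length : Int))
  PySem.List.slice arr (some s.1) (some s.2)

-- ===== PRECONDITION & SPEC =====
def Spec_solution (arr : List Int) (query : List Int) (out : List Int) : Prop := out = solution_alt arr query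
instance (arr : List Int) (query : List Int) (out : List Int) : Decidable (Spec_solution arr query out) := by unfold Spec_solution; infer_instance

-- ===== CLAIM (what is proved, stated in full; the proofs are below) =====
def Claim_equal_solution : Prop := ∀ (arr : List Int) (query : List Int), Dom_solution arr query → Spec_solution arr query (solution arr query)

-- ===== LEMMAS AND PROOFS =====

-- A's loop body, on an (index, value) pair
def solStepA (a : List Int) (iq : Int × Int) : List Int :=
  if PySem.Int.mod iq.1 2 = 0 then
    PySem.List.slice a none (some (iq.2 + 1))
  else
    PySem.List.slice a (some iq.2) none

lemma slice_to_clamp (xs : List Int) (b : Int) :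
    PySem.List.slice xs none (some b) = xs.take (PySem.List.clampIdx xs.length b) := by
  simp [PySem.List.slice]

-- B's clamp arithmetic computes exactly Python's slice-index clamping
lemma clamp_int (L : Nat) (b : Int) :
    max 0 (min (if b < 0 then b + (L : Int) else b) (L : Int))
      = ((PySem.List.clampIdx L b : Nat) : Int) := by
  simp only [PySem.List.clampIdx]
  split_ifs <;> omega

-- main loop invariant: A's fold on the current window slice matches B's fold on the bounds
lemma loop_eq (arr : List Int) (ps : List (Int × Int)) :
    ∀ (lo hi : Nat), lo ≤ hi → hi ≤ arr.length →
    ∃ lo' hi' : Nat, lo' ≤ hi' ∧ hi' ≤ arr.length ∧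
      ps.foldl solAltStep ((lo : Int), (hi : Int)) = ((lo' : Int), (hi' : Int)) ∧
      ps.foldl solStepA ((arr.drop lo).take (hi - lo)) = (arr.drop lo').take (hi' - lo') := by
  induction ps with
  | nil => intro lo hi h1 h2; exact ⟨lo, hi, h1, h2, rfl, rfl⟩
  | cons p ps ih =>
    intro lo hi h1 h2
    have hlen : ((arr.drop lo).take (hi - lo)).length = hi - lo := by
      simp [List.length_take, List.length_drop]; omega
    by_cases hp : PySem.Int.mod p.1 2 = 0
    · -- even index: arr = arr[:q+1]
      set c := PySem.List.clampIdx (hi - lo) (p.2 + 1) with hc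
      have hcle : c ≤ hi - lo := PySem.List.clampIdx_le _ _
      have hB : solAltStep ((lo : Int), (hi : Int)) p = ((lo : Int), ((lo + c : Nat) : Int)) := by
        simp only [solAltStep, hp, if_pos]
        have := clamp_int (hi - lo) (p.2 + 1)
        have hL : ((hi : Int) - (lo : Int)) = ((hi - lo : Nat) : Int) := by omega
        rw [hL]
        refine Prod.ext rfl ?_
        simp only [this]
        push_cast
        ring
      have hA : solStepA ((arr.drop lo).take (hi - lo)) p
          = (arr.drop lo).take ((lo + c) - lo) := by
        simp only [solStepA, hp, if_pos, slice_to_clamp, hlen, List.take_take, ← hc]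
        congr 1
        omega
      obtain ⟨lo', hi', a1, a2, a3, a4⟩ := ih lo (lo + c) (by omega) (by omega)
      exact ⟨lo', hi', a1, a2, by simpa [List.foldl_cons, hB] using a3,
        by simpa [List.foldl_cons, hA] using a4⟩
    · -- odd index: arr = arr[q:]
      set c := PySem.List.clampIdx (hi - lo) p.2 with hc
      have hcle : c ≤ hi - lo := PySem.List.clampIdx_le _ _
      have hB : solAltStep ((lo : Int), (hi : Int)) p = (((lo + c : Nat) : Int), (hi : Int)) := by
        simp only [solAltStep, hp, if_false]
        have := clamp_int (hi - lo) p.2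
        have hL : ((hi : Int) - (lo : Int)) = ((hi - lo : Nat) : Int) := by omega
        rw [hL]
        refine Prod.ext ?_ rfl
        simp only [this]
        push_cast
        ring
      have hA : solStepA ((arr.drop lo).take (hi - lo)) p
          = (arr.drop (lo + c)).take (hi - (lo + c)) := by
        simp only [solStepA, hp, if_false, PySem.List.slice_some_none, hlen, ← hc]
        rw [List.drop_take, List.drop_drop]
        congr 1
        omega
      obtain ⟨lo', hi', a1, a2, a3, a4⟩ := ih (lo + c) hi (by omega) h2
      exact ⟨lo', hi', a1, a2, by simpa [List.foldl_cons, hB] using a3,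
        by simpa [List.foldl_cons, hA] using a4⟩

-- A's fold over range(len(query)) is the fold of solStepA over enumerate(query)
lemma solution_eq_enum (arr query : List Int) :
    solution arr query = (PySem.List.enumerate query 0).foldl solStepA arr := by
  rw [PySem.List.enumerate_eq_map_pyRange (d := 0), List.foldl_map]
  rfl

-- ===== VERDICT (by name: the statement is the Claim_ definition above) =====
theorem solution_spec : Claim_equal_solution := by
  intro arr query _
  show solution arr query = solution_alt arr query
  obtain ⟨lo', hi', h1, h2, h3, h4⟩ :=
    loop_eq arr (PySem.List.enumerate query 0) 0 arr.length (Nat.zero_le _) le_rfl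
  rw [solution_eq_enum]
  simp only [solution_alt]
  simp only [Nat.cast_zero] at h3
  rw [h3]
  simp only [PySem.List.slice_natCast]
  simpa using h4
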